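-- pv_equiv track=rewrite | github.com/qmkoh/Greyctf2025-writeups | ezpz/dist-tung_tung_tung_sahur/solve_tung.py | integer_nthroot
-- ===== SOURCE A (Python) =====
-- def integer_nthroot(x, n):
--     if x < 0:
--         raise ValueError("Cannot compute root of negative number")
--     if x == 0:
--         return 0, True
--
--     low, high = 0, x
--     while low < high:
--         mid = (low + high) // 2
--         mid_pow = pow(mid, n)
--         if mid_pow == x:
--             return mid, True
--         elif mid_pow < x:
--             low = mid + 1
--         else:
--             high = mid
--
--     root = low - 1
--     return root, (pow(root, n) == x)
-- ===== SOURCE B (Python) =====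
-- def integer_nthroot(x, n):
--     if x < 0:
--         raise ValueError("Cannot compute root of negative number")
--     if x == 0:
--         return 0, True
--     if n < 0:
--         raise ValueError("n must be a nonnegative integer")
--     if n == 0:
--         # r**0 == x has a solution only for x == 1 (least such root: 0, since 0**0 == 1)
--         if x == 1:
--             return 0, True
--         raise ValueError("x has no integer 0th root")
--     if x.bit_length() <= n:
--         # x < 2**n, so the floor n-th root is 1
--         return 1, x == 1
--     # Newton's integer nth-root iteration, started just above the root.
--     r = 1 << -(-x.bit_length() // n)
--     while True:
--         t = ((n - 1) * r + x // r ** (n - 1)) // n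
--         if t >= r:
--             break
--         r = t
--     return r, r ** n == x
-- ===== Notes on version B (the rewrite author's own statement) =====
-- stated objective: faster
-- what changed: Binary search over [0,x] with a full n-th power at every probe is replaced by Newton's integer nth-root iteration started at 2^ceil(bitlen(x)/n) (with direct answers for the tiny-root cases), so all intermediates stay near root-sized instead of up to n*log2(x) bits.
-- intended difference: On inputs with n >= 1, x >= 1 and (n = 1 or x = 1) the floor n-th root is x itself, which A's binary search over [0,x) never probes, so A returns (x-1, False); B returns the intended exact root ((x, True) for n = 1, (1, True) for x = 1). — e.g. on integer_nthroot(1, 2): A returns (0, false), B returns (1, true)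
-- outside the precondition, e.g. on integer_nthroot(4, -1): A returns (3, False), B raises ValueError; on integer_nthroot(4, 0): A returns (3, False), B raises ValueError
import Mathlib
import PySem

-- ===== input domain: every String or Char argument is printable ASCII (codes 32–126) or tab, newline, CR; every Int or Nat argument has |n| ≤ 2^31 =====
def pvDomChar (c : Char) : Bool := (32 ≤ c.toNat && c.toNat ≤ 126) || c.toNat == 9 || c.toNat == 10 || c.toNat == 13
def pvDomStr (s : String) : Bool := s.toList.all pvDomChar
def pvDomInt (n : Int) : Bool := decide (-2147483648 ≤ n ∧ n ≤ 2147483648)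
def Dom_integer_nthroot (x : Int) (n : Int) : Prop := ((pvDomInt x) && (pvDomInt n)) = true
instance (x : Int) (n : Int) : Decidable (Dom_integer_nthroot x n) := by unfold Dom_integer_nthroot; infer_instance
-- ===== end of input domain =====

-- B replaces A's binary search over [0, x] (a full n-th power at every probe) by Newton's integer
-- nth-root iteration started at 2^ceil(bitlen(x)/n); B also returns the intended exact answer on
-- the corner x >= 1 with (n == 1 or x == 1), where A's search never probes the root x itself.

-- ===== PORT A =====
-- The while-loop of A, with a fuel bound: high - low shrinks by at least 1 per iteration, so the
-- initial fuel x.toNat = (high - low).toNat is never exhausted (the 0-fuel branch repeats the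
-- loop-end value; the lemmas below only ever use it when low = high).
-- pow(mid, n) is ported as mid ^ n.toNat, exact for the n ≥ 1 admitted by Pre_.
def aLoop (x n : Int) : Nat → Int → Int → Int × Bool
  | 0, low, _high => (low - 1, decide ((low - 1) ^ n.toNat = x))
  | fuel + 1, low, high =>
    if low < high then
      let mid := PySem.Int.floordiv (low + high) 2
      let midPow := mid ^ n.toNat
      if midPow = x then (mid, true)
      else if midPow < x then aLoop x n fuel (mid + 1) high
      else aLoop x n fuel low mid
    else (low - 1, decide ((low - 1) ^ n.toNat = x))

def integer_nthroot (x : Int) (n : Int) : Int × Bool :=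
  if x < 0 then (0, false)       -- Python raises ValueError here; outside Pre_
  else if x = 0 then (0, true)
  else aLoop x n (x - 0).toNat 0 x

-- ===== PORT B =====
-- Newton iteration `while True: t = ((n-1)*r + x//r**(n-1))//n; if t >= r: break; r = t`,
-- with fuel: r strictly decreases each pass, so the initial fuel r0.toNat is never exhausted
-- (the 0-fuel branch repeats the break value; the lemmas only use it when r is already the root).
def bLoop (x n : Int) : Nat → Int → Int × Bool
  | 0, r => (r, decide (r ^ n.toNat = x))
  | fuel + 1, r =>
    let t := PySem.Int.floordiv ((n - 1) * r + PySem.Int.floordiv x (r ^ (n - 1).toNat)) n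
    if r ≤ t then (r, decide (r ^ n.toNat = x))
    else bLoop x n fuel t

def integer_nthroot_alt (x : Int) (n : Int) : Int × Bool :=
  if x < 0 then (0, false)       -- Python raises ValueError; outside Pre_
  else if x = 0 then (0, true)
  else if n < 0 then (0, false)  -- Python raises ValueError; outside Pre_
  else if n = 0 then (if x = 1 then (0, true) else (0, false))  -- x ≠ 1: ValueError, outside Pre_
  else if (PySem.Int.bitLength x : Int) ≤ n then (1, decide (x = 1))  -- x < 2**n: the root is 1
  else
    -- r0 = 1 << -(-x.bit_length() // n)  (the shift amount is ≥ 1 on Pre_, so .toNat is exact)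
    let r0 : Int := (1 : Int) <<< (-(PySem.Int.floordiv (-(PySem.Int.bitLength x : Int)) n)).toNat
    bLoop x n r0.toNat r0

-- ===== PRECONDITION & SPEC =====
-- Pre_ excludes x < 0, where A raises ValueError, and n ≤ 0 with 2 ≤ x (or n < 0 with x = 1),
-- which is outside the nth-root domain: there A raises ZeroDivisionError on some inputs
-- (e.g. x = 1, n = -1) and on the rest returns artefacts of Python's float pow / the degenerate
-- n = 0 search, while B raises ValueError.  (x = 0 for every n, and x = 1 with n = 0, stay
-- inside: both programs return the same value there.)
def Pre_integer_nthroot (x : Int) (n : Int) : Prop := 0 ≤ x ∧ (x = 0 ∨ 1 ≤ n ∨ (x = 1 ∧ n = 0))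
instance (x : Int) (n : Int) : Decidable (Pre_integer_nthroot x n) := by unfold Pre_integer_nthroot; infer_instance
def pvWitness_integer_nthroot : Int × Int := (4, 2)

-- On inputs with n ≥ 1, x ≥ 1 and (n = 1 or x = 1) the floor n-th root is x itself, which A's
-- binary search over [0, x) never probes, so A returns (x-1, False); B returns the intended
-- exact root ((x, True) for n = 1, (1, True) for x = 1).
def D_integer_nthroot (x : Int) (n : Int) : Prop := 1 ≤ x ∧ 1 ≤ n ∧ (n = 1 ∨ x = 1)
instance (x : Int) (n : Int) : Decidable (D_integer_nthroot x n) := by unfold D_integer_nthroot; infer_instance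

def Spec_integer_nthroot (x : Int) (n : Int) (out : Int × Bool) : Prop := ¬ D_integer_nthroot x n → out = integer_nthroot_alt x n
instance (x : Int) (n : Int) (out : Int × Bool) : Decidable (Spec_integer_nthroot x n out) := by unfold Spec_integer_nthroot; infer_instance

def pvDiffWitness_integer_nthroot : Int × Int := (1, 2)
def pvDiffWitnessOut_integer_nthroot : (Int × Bool) × (Int × Bool) := ((0, false), (1, true))

-- ===== CLAIM (what is proved, stated in full; the proofs are below) =====
def Claim_unchanged_integer_nthroot : Prop := ∀ (x : Int) (n : Int), Dom_integer_nthroot x n → Pre_integer_nthroot x n → Spec_integer_nthroot x n (integer_nthroot x n)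
def Claim_changed_integer_nthroot : Prop := Dom_integer_nthroot (pvDiffWitness_integer_nthroot.1) (pvDiffWitness_integer_nthroot.2) ∧ Pre_integer_nthroot (pvDiffWitness_integer_nthroot.1) (pvDiffWitness_integer_nthroot.2) ∧ D_integer_nthroot (pvDiffWitness_integer_nthroot.1) (pvDiffWitness_integer_nthroot.2) ∧ integer_nthroot (pvDiffWitness_integer_nthroot.1) (pvDiffWitness_integer_nthroot.2) = pvDiffWitnessOut_integer_nthroot.1 ∧ integer_nthroot_alt (pvDiffWitness_integer_nthroot.1) (pvDiffWitness_integer_nthroot.2) = pvDiffWitnessOut_integer_nthroot.2 ∧ pvDiffWitnessOut_integer_nthroot.1 ≠ pvDiffWitnessOut_integer_nthroot.2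
def Claim_exact_integer_nthroot : Prop := ∀ (x : Int) (n : Int), Dom_integer_nthroot x n → Pre_integer_nthroot x n → D_integer_nthroot x n → integer_nthroot x n ≠ integer_nthroot_alt x n

-- ===== LEMMAS AND PROOFS =====

-- Weighted AM-GM instance:  n·s·r^(n-1) ≤ s^n + (n-1)·r^n  for nonnegative integers.
lemma amgm (s r : Int) (N : Nat) (hN : 1 ≤ N) (hs : 0 ≤ s) (hr : 0 ≤ r) :
    (N : Int) * s * r ^ (N - 1) ≤ s ^ N + ((N : Int) - 1) * r ^ N := by
  have key : s ^ N + ((N : Int) - 1) * r ^ N - (N : Int) * s * r ^ (N - 1)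
      = (r - s) * ((N : Int) * r ^ (N - 1) - ∑ i ∈ Finset.range N, r ^ i * s ^ (N - 1 - i)) := by
    have hg := geom_sum₂_mul r s N
    have hp : r ^ (N - 1) * r = r ^ N := by
      rw [← pow_succ]; congr 1; omega
    nlinarith [hg, hp]
  have hterm : ∀ _hrs : s ≤ r, (∑ i ∈ Finset.range N, r ^ i * s ^ (N - 1 - i))
      ≤ (N : Int) * r ^ (N - 1) := by
    intro hrs
    calc (∑ i ∈ Finset.range N, r ^ i * s ^ (N - 1 - i))
        ≤ ∑ _i ∈ Finset.range N, r ^ (N - 1) := by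
          apply Finset.sum_le_sum
          intro i hi
          have hi' : i < N := Finset.mem_range.mp hi
          have h1 : s ^ (N - 1 - i) ≤ r ^ (N - 1 - i) := pow_le_pow_left₀ hs hrs _
          have h2 : r ^ i * s ^ (N - 1 - i) ≤ r ^ i * r ^ (N - 1 - i) :=
            mul_le_mul_of_nonneg_left h1 (pow_nonneg hr i)
          have h3 : r ^ i * r ^ (N - 1 - i) = r ^ (N - 1) := by
            rw [← pow_add]; congr 1; omega
          linarith
      _ = (N : Int) * r ^ (N - 1) := by
          rw [Finset.sum_const, Finset.card_range, nsmul_eq_mul]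
  have hterm' : ∀ _hrs : r ≤ s, (N : Int) * r ^ (N - 1)
      ≤ (∑ i ∈ Finset.range N, r ^ i * s ^ (N - 1 - i)) := by
    intro hrs
    calc (N : Int) * r ^ (N - 1)
        = ∑ _i ∈ Finset.range N, r ^ (N - 1) := by
          rw [Finset.sum_const, Finset.card_range, nsmul_eq_mul]
      _ ≤ ∑ i ∈ Finset.range N, r ^ i * s ^ (N - 1 - i) := by
          apply Finset.sum_le_sum
          intro i hi
          have hi' : i < N := Finset.mem_range.mp hi
          have h1 : r ^ (N - 1 - i) ≤ s ^ (N - 1 - i) := pow_le_pow_left₀ hr hrs _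
          have h2 : r ^ i * r ^ (N - 1 - i) ≤ r ^ i * s ^ (N - 1 - i) :=
            mul_le_mul_of_nonneg_left h1 (pow_nonneg hr i)
          have h3 : r ^ i * r ^ (N - 1 - i) = r ^ (N - 1) := by
            rw [← pow_add]; congr 1; omega
          linarith
  rcases le_total s r with hrs | hrs
  · nlinarith [hterm hrs]
  · nlinarith [hterm' hrs]

-- Newton step stays at or above the floor root.
lemma newton_ge (x n s r : Int) (hn : 1 ≤ n) (hs : 0 ≤ s) (hr : 1 ≤ r)
    (hsx : s ^ n.toNat ≤ x) :
    s ≤ PySem.Int.floordiv ((n - 1) * r + PySem.Int.floordiv x (r ^ (n - 1).toNat)) n := by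
  have hn0 : (0 : Int) < n := by omega
  have hNn : ((n.toNat : Int)) = n := Int.toNat_of_nonneg (by omega)
  have hN1 : 1 ≤ n.toNat := by omega
  have hrp : (0 : Int) < r ^ (n - 1).toNat := pow_pos (by omega) _
  rw [PySem.Int.le_floordiv_iff_mul_le hn0]
  have hfl : s * n - (n - 1) * r ≤ PySem.Int.floordiv x (r ^ (n - 1).toNat) := by
    rw [PySem.Int.le_floordiv_iff_mul_le hrp]
    have hexp : (n - 1).toNat = n.toNat - 1 := by omega
    have hrr : r * r ^ (n.toNat - 1) = r ^ n.toNat := by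
      rw [← pow_succ']; congr 1; omega
    have hA := amgm s r n.toNat hN1 hs (by omega)
    rw [hNn] at hA
    have hkey : (s * n - (n - 1) * r) * r ^ (n.toNat - 1)
        = n * s * r ^ (n.toNat - 1) - (n - 1) * r ^ n.toNat := by
      rw [← hrr]; ring
    rw [hexp, hkey]
    linarith [hA, hsx]
  nlinarith [hfl]

-- Newton step strictly decreases while r is above the root.
lemma newton_lt (x n r : Int) (hn : 1 ≤ n) (hr : 1 ≤ r) (hrx : x < r ^ n.toNat) :
    PySem.Int.floordiv ((n - 1) * r + PySem.Int.floordiv x (r ^ (n - 1).toNat)) n < r := by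
  have hn0 : (0 : Int) < n := by omega
  have hrp : (0 : Int) < r ^ (n - 1).toNat := pow_pos (by omega) _
  rw [PySem.Int.floordiv_lt_iff_lt_mul hn0]
  have hfl : PySem.Int.floordiv x (r ^ (n - 1).toNat) < r := by
    rw [PySem.Int.floordiv_lt_iff_lt_mul hrp]
    have hrr : r * r ^ (n - 1).toNat = r ^ n.toNat := by
      rw [← pow_succ']; congr 1; omega
    omega
  nlinarith [hfl]

lemma bLoop_eq (x n s : Int) (hn : 1 ≤ n) (hs : 1 ≤ s)
    (h1 : s ^ n.toNat ≤ x) (h2 : x < (s + 1) ^ n.toNat) :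
    ∀ fuel r, s ≤ r → (r - s).toNat ≤ fuel → bLoop x n fuel r = (s, decide (s ^ n.toNat = x)) := by
  intro fuel
  induction fuel with
  | zero =>
    intro r hsr hft
    have hr : r = s := by omega
    subst hr
    rfl
  | succ fuel ih =>
    intro r hsr hft
    have ht := newton_ge x n s r hn (by omega) (by omega) h1
    rcases eq_or_lt_of_le hsr with heq | hlt
    · simp only [bLoop]
      rw [if_pos (heq ▸ ht)]
      rw [← heq]
    · have hr1 : 1 ≤ r := by omega
      have hrx : x < r ^ n.toNat :=
        lt_of_lt_of_le h2 (pow_le_pow_left₀ (by omega) (by omega) _)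
      have ht2 := newton_lt x n r hn hr1 hrx
      simp only [bLoop]
      rw [if_neg (not_le.mpr ht2)]
      exact ih _ ht (by omega)

-- the binary search finds an exact root strictly below the initial high
lemma aLoop_exact (x n s : Int) (hn : 1 ≤ n) (hs : 0 ≤ s) (hsx : s ^ n.toNat = x) :
    ∀ fuel low high, 0 ≤ low → low ≤ s → s < high → (high - low).toNat ≤ fuel →
      aLoop x n fuel low high = (s, true) := by
  intro fuel
  induction fuel with
  | zero => intro low high h0 hls hsh hft; omega
  | succ fuel ih =>
    intro low high h0 hls hsh hft
    have hlt : low < high := by omega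
    have hmidb := PySem.Int.floordiv_two_mid_bounds (le_of_lt hlt)
    have hmidlt : PySem.Int.floordiv (low + high) 2 < high := by
      rw [PySem.Int.floordiv_lt_iff_lt_mul (by norm_num)]; omega
    simp only [aLoop]
    rw [if_pos hlt]
    rcases lt_trichotomy (PySem.Int.floordiv (low + high) 2) s with hc | hc | hc
    · have hpow : PySem.Int.floordiv (low + high) 2 ^ n.toNat < x := by
        rw [← hsx]
        exact pow_lt_pow_left₀ hc (by omega) (by omega)
      rw [if_neg (by omega), if_pos hpow]
      exact ih _ _ (by omega) (by omega) hsh (by omega)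
    · rw [if_pos (by rw [hc, hsx])]
      rw [hc]
    · have hpow : x < PySem.Int.floordiv (low + high) 2 ^ n.toNat := by
        rw [← hsx]
        exact pow_lt_pow_left₀ hc hs (by omega)
      rw [if_neg (by omega), if_neg (by omega)]
      exact ih _ _ h0 hls hc (by omega)

-- no exact root: the search converges to low = high = s + 1
lemma aLoop_noexact (x n s : Int) (_hn : 1 ≤ n) (hs : 0 ≤ s)
    (h1 : s ^ n.toNat < x) (h2 : x < (s + 1) ^ n.toNat) :
    ∀ fuel low high, 0 ≤ low → low ≤ s + 1 → s + 1 ≤ high → (high - low).toNat ≤ fuel →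
      aLoop x n fuel low high = (s, false) := by
  intro fuel
  induction fuel with
  | zero =>
    intro low high h0 hls hsh hft
    have hlh : low = high := by omega
    have hlow : low = s + 1 := by omega
    simp only [aLoop, hlow]
    simp only [add_sub_cancel_right]
    simp [ne_of_lt h1]
  | succ fuel ih =>
    intro low high h0 hls hsh hft
    rcases eq_or_lt_of_le (show low ≤ high by omega) with hlh | hlt
    · have hlow : low = s + 1 := by omega
      simp only [aLoop]
      rw [if_neg (by omega)]
      simp only [hlow, add_sub_cancel_right]
      simp [ne_of_lt h1]
    · have hmidb := PySem.Int.floordiv_two_mid_bounds (le_of_lt hlt)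
      have hmidlt : PySem.Int.floordiv (low + high) 2 < high := by
        rw [PySem.Int.floordiv_lt_iff_lt_mul (by norm_num)]; omega
      simp only [aLoop]
      rw [if_pos hlt]
      rcases le_or_gt (PySem.Int.floordiv (low + high) 2) s with hc | hc
      · have hpow : PySem.Int.floordiv (low + high) 2 ^ n.toNat < x :=
          lt_of_le_of_lt (pow_le_pow_left₀ (by omega) hc _) h1
        rw [if_neg (by omega), if_pos hpow]
        exact ih _ _ (by omega) (by omega) hsh (by omega)
      · have hpow : x < PySem.Int.floordiv (low + high) 2 ^ n.toNat :=
          lt_of_lt_of_le h2 (pow_le_pow_left₀ (by omega) (by omega) _)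
        rw [if_neg (by omega), if_neg (by omega)]
        exact ih _ _ h0 hls (by omega) (by omega)

-- when no probe in [0, x) can hit a root, high never moves and the search ends at (x-1, False)
lemma aLoop_top (x n : Int) (_hx : 1 ≤ x)
    (hp : ∀ m : Int, 0 ≤ m → m < x → m ^ n.toNat < x)
    (hlast : ¬((x - 1) ^ n.toNat = x)) :
    ∀ fuel low, 0 ≤ low → low ≤ x → (x - low).toNat ≤ fuel →
      aLoop x n fuel low x = (x - 1, false) := by
  have hlastF : ((x - 1) ^ n.toNat = x) = False := by simp [hlast]
  intro fuel
  induction fuel with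
  | zero =>
    intro low h0 hlx hft
    have hlow : low = x := by omega
    simp only [aLoop, hlow]
    simp [hlastF]
  | succ fuel ih =>
    intro low h0 hlx hft
    rcases eq_or_lt_of_le hlx with hlh | hlt
    · simp only [aLoop]
      rw [if_neg (by omega)]
      simp only [hlh]
      simp [hlastF]
    · have hmidb := PySem.Int.floordiv_two_mid_bounds (le_of_lt hlt)
      have hmidlt : PySem.Int.floordiv (low + x) 2 < x := by
        rw [PySem.Int.floordiv_lt_iff_lt_mul (by norm_num)]; omega
      simp only [aLoop]
      rw [if_pos hlt]
      have hpow : PySem.Int.floordiv (low + x) 2 ^ n.toNat < x := hp _ (by omega) hmidlt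
      rw [if_neg (by omega), if_pos hpow]
      exact ih _ (by omega) (by omega) (by omega)

-- existence of the floor n-th root
lemma exists_root (x n : Int) (hx : 1 ≤ x) (hn : 1 ≤ n) :
    ∃ s : Int, 1 ≤ s ∧ s ^ n.toNat ≤ x ∧ x < (s + 1) ^ n.toNat := by
  have hN : 1 ≤ n.toNat := by omega
  have hm : 1 ≤ x.toNat := by omega
  have hP1 : (1 : Nat) ^ n.toNat ≤ x.toNat := by simpa using hm
  have ht1 : 1 ≤ Nat.findGreatest (fun t => t ^ n.toNat ≤ x.toNat) x.toNat :=
    Nat.le_findGreatest hm hP1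
  have htle : (Nat.findGreatest (fun t => t ^ n.toNat ≤ x.toNat) x.toNat) ^ n.toNat ≤ x.toNat :=
    Nat.findGreatest_spec (P := fun t => t ^ n.toNat ≤ x.toNat) (m := 1) hm hP1
  have htb : Nat.findGreatest (fun t => t ^ n.toNat ≤ x.toNat) x.toNat ≤ x.toNat :=
    Nat.findGreatest_le x.toNat
  have htgt : x.toNat < (Nat.findGreatest (fun t => t ^ n.toNat ≤ x.toNat) x.toNat + 1) ^ n.toNat := by
    rcases le_or_gt (Nat.findGreatest (fun t => t ^ n.toNat ≤ x.toNat) x.toNat + 1) x.toNat with hle | hgt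
    · have := Nat.findGreatest_is_greatest
        (P := fun t => t ^ n.toNat ≤ x.toNat)
        (n := x.toNat)
        (show Nat.findGreatest (fun t => t ^ n.toNat ≤ x.toNat) x.toNat
          < Nat.findGreatest (fun t => t ^ n.toNat ≤ x.toNat) x.toNat + 1 by omega) hle
      simp only [not_le] at this
      omega
    · have hb : Nat.findGreatest (fun t => t ^ n.toNat ≤ x.toNat) x.toNat + 1
          ≤ (Nat.findGreatest (fun t => t ^ n.toNat ≤ x.toNat) x.toNat + 1) ^ n.toNat :=
        Nat.le_self_pow (by omega) _
      omega
  refine ⟨((Nat.findGreatest (fun t => t ^ n.toNat ≤ x.toNat) x.toNat : Nat) : Int),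
    by exact_mod_cast ht1, ?_, ?_⟩
  · have h : (((Nat.findGreatest (fun t => t ^ n.toNat ≤ x.toNat) x.toNat : Nat) : Int)) ^ n.toNat
        ≤ ((x.toNat : Int)) := by exact_mod_cast htle
    rwa [Int.toNat_of_nonneg (by omega)] at h
  · have h : ((x.toNat : Int))
        < (((Nat.findGreatest (fun t => t ^ n.toNat ≤ x.toNat) x.toNat : Nat) : Int) + 1) ^ n.toNat := by
      exact_mod_cast htgt
    rwa [Int.toNat_of_nonneg (by omega)] at h

-- B's head: for 1 ≤ x, 1 ≤ n, integer_nthroot_alt returns (s, s^n == x)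
lemma alt_eq (x n s : Int) (hx : 1 ≤ x) (hn : 1 ≤ n) (hs : 1 ≤ s)
    (h1 : s ^ n.toNat ≤ x) (h2 : x < (s + 1) ^ n.toNat) :
    integer_nthroot_alt x n = (s, decide (s ^ n.toNat = x)) := by
  unfold integer_nthroot_alt
  rw [if_neg (by omega), if_neg (by omega), if_neg (by omega), if_neg (by omega)]
  rcases le_or_gt ((PySem.Int.bitLength x : Nat) : Int) n with hbln | hbln
  · -- x < 2^n : the floor root s is 1
    rw [if_pos hbln]
    have hxlt : x < (2 : Int) ^ n.toNat := by
      have ha : x.natAbs < 2 ^ PySem.Int.bitLength x := PySem.Int.lt_two_pow_bitLength x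
      have hb : (2 : Nat) ^ PySem.Int.bitLength x ≤ 2 ^ n.toNat :=
        Nat.pow_le_pow_right (by norm_num) (by omega)
      have hc : ((x.natAbs : Int)) < ((2 : Int)) ^ n.toNat := by exact_mod_cast lt_of_lt_of_le ha hb
      rwa [Int.natAbs_of_nonneg (by omega)] at hc
    have hs1' : s = 1 := by
      by_contra hne
      have hs2 : 2 ≤ s := by omega
      have : (2 : Int) ^ n.toNat ≤ s ^ n.toNat := pow_le_pow_left₀ (by norm_num) hs2 _
      linarith
    subst hs1'
    simp only [one_pow, Prod.mk.injEq, true_and]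
    rw [decide_eq_decide]
    exact ⟨fun h => h.symm, fun h => h.symm⟩
  rw [if_neg (by omega)]
  have hbl1 : 1 ≤ PySem.Int.bitLength x := by
    by_contra h
    have h0 : PySem.Int.bitLength x = 0 := by omega
    have := PySem.Int.lt_two_pow_bitLength x
    rw [h0] at this
    simp at this
    omega
  have hq := (PySem.Int.neg_floordiv_neg_eq_iff_of_pos
    (a := ((PySem.Int.bitLength x : Nat) : Int)) (b := n)
    (q := -(PySem.Int.floordiv (-((PySem.Int.bitLength x : Nat) : Int)) n)) (by omega)).mp rfl
  set q := -(PySem.Int.floordiv (-((PySem.Int.bitLength x : Nat) : Int)) n) with hqdef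
  have hq1 : 1 ≤ q := by nlinarith [hq.1, hq.2]
  have hr0 : (1 : Int) <<< q.toNat = 2 ^ q.toNat := by rw [Int.shiftLeft_eq]; ring
  show bLoop x n ((1 : Int) <<< q.toNat).toNat ((1 : Int) <<< q.toNat) = (s, decide (s ^ n.toNat = x))
  rw [hr0]
  have hblk : PySem.Int.bitLength x ≤ q.toNat * n.toNat := by
    have hc : ((PySem.Int.bitLength x : Nat) : Int) ≤ ((q.toNat : Int)) * ((n.toNat : Int)) := by
      rw [Int.toNat_of_nonneg (by omega : (0:Int) ≤ q), Int.toNat_of_nonneg (by omega : (0:Int) ≤ n)]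
      exact hq.2
    exact_mod_cast hc
  have hxlt : x < (2 : Int) ^ (q.toNat * n.toNat) := by
    have ha : x.natAbs < 2 ^ PySem.Int.bitLength x := PySem.Int.lt_two_pow_bitLength x
    have hb : (2 : Nat) ^ PySem.Int.bitLength x ≤ 2 ^ (q.toNat * n.toNat) :=
      Nat.pow_le_pow_right (by norm_num) hblk
    have hc : x.natAbs < 2 ^ (q.toNat * n.toNat) := lt_of_lt_of_le ha hb
    have hd : ((x.natAbs : Int)) < ((2 : Int)) ^ (q.toNat * n.toNat) := by exact_mod_cast hc
    rwa [Int.natAbs_of_nonneg (by omega)] at hd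
  have hsr0 : s < 2 ^ q.toNat := by
    by_contra h
    rw [not_lt] at h
    have hmul : ((2 : Int) ^ q.toNat) ^ n.toNat ≤ s ^ n.toNat :=
      pow_le_pow_left₀ (by positivity) h _
    rw [← pow_mul] at hmul
    linarith
  have hr0pos : (0 : Int) < 2 ^ q.toNat := by positivity
  exact bLoop_eq x n s hn hs h1 h2 _ _ (le_of_lt hsr0) (by omega)

-- ===== VERDICT (by name: the statement is the Claim_ definition above) =====
theorem integer_nthroot_spec : Claim_unchanged_integer_nthroot := by
  intro x n _hdom hpre hnd
  obtain ⟨hx0, hor⟩ := hpre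
  rcases eq_or_lt_of_le hx0 with hx | hx1
  · rw [← hx]
    simp [integer_nthroot, integer_nthroot_alt]
  · have hn0 : 0 ≤ n := by
      rcases hor with h | h | h <;> omega
    rcases eq_or_lt_of_le hn0 with hn | hn1
    · -- n = 0: Pre_ then forces x = 1, where both return (0, true)
      have hx1' : x = 1 := by omega
      subst hx1'
      rw [← hn]
      decide
    · have hnx : ¬(n = 1 ∨ x = 1) := fun h => hnd ⟨by omega, by omega, h⟩
      have hn2 : 2 ≤ n := by omega
      have hx2 : 2 ≤ x := by omega
      obtain ⟨s, hs1, hsle, hslt⟩ := exists_root x n (by omega) (by omega)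
      have hA : integer_nthroot x n = aLoop x n (x - 0).toNat 0 x := by
        unfold integer_nthroot
        rw [if_neg (by omega), if_neg (by omega)]
      have halt := alt_eq x n s (by omega) (by omega) hs1 hsle hslt
      have hself : s ≤ s ^ n.toNat := le_self_pow₀ (by omega) (by omega)
      rcases eq_or_lt_of_le hsle with hex | hlt2
      · have hsx : s < x := by
          rcases eq_or_lt_of_le (le_of_le_of_eq hself hex) with h | h
          · exfalso
            have hfix : x ^ n.toNat = x := by subst h; exact hex
            have hsq : x ^ 2 ≤ x ^ n.toNat := pow_le_pow_right₀ (by omega) (by omega)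
            nlinarith
          · exact h
        rw [hA, aLoop_exact x n s (by omega) (by omega) hex _ 0 x le_rfl (by omega) hsx (by omega), halt]
        simp [hex]
      · have hsx : s < x := by omega
        rw [hA, aLoop_noexact x n s (by omega) (by omega) hlt2 hslt _ 0 x le_rfl (by omega) (by omega) (by omega), halt]
        simp [ne_of_lt hlt2]

theorem integer_nthroot_changed : Claim_changed_integer_nthroot := by
  unfold Claim_changed_integer_nthroot; decide

theorem integer_nthroot_tight : Claim_exact_integer_nthroot := by
  intro x n _hdom _hpre hd
  obtain ⟨hx1, hn1, hor⟩ := hd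
  have hfix : x ^ n.toNat = x := by
    rcases hor with h | h
    · rw [h]; simp
    · rw [h]; simp
  have hA : integer_nthroot x n = (x - 1, false) := by
    unfold integer_nthroot
    rw [if_neg (by omega), if_neg (by omega)]
    refine aLoop_top x n hx1 ?_ ?_ _ 0 le_rfl (by omega) (by omega)
    · intro m hm0 hmx
      calc m ^ n.toNat < x ^ n.toNat := pow_lt_pow_left₀ hmx hm0 (by omega)
        _ = x := hfix
    · have : (x - 1) ^ n.toNat < x ^ n.toNat := pow_lt_pow_left₀ (by omega) (by omega) (by omega)
      omega
  have halt : integer_nthroot_alt x n = (x, true) := by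
    have hup : x < (x + 1) ^ n.toNat := by
      have : x + 1 ≤ (x + 1) ^ n.toNat := le_self_pow₀ (by omega) (by omega)
      omega
    have := alt_eq x n x hx1 (by omega) hx1 (le_of_eq hfix) hup
    simpa [hfix] using this
  rw [hA, halt]
  simp
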